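-- pv_equiv track=rewrite | github.com/rashevskyv/4ifir-checker | checker.py | split_html_content
-- ===== SOURCE A (Python) =====
-- def split_html_content(content, max_length=4096, tag='<code>'):
--     content_length = len(content)
--     if content_length <= max_length:
--         return [content]
--
--     blocks = []
--     start_index = 0
--
--     while start_index < content_length:
--         end_index = start_index + max_length
--         if end_index < content_length:
--             end_index = content.rfind(tag, start_index, end_index)
--             if end_index == -1:
--                 end_index = start_index + max_length
--
--         blocks.append(content[start_index:end_index])
--         start_index = end_index
--
--     return blocks
-- ===== SOURCE B (Python) =====
-- def split_html_content(content, max_length=4096, tag='<code>'):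
--     n = len(content)
--     if n <= max_length:
--         return [content]
--     t = len(tag)
--     # backward-carrying pass: last[j] = largest i <= j with content.startswith(tag, i), else -1
--     last = []
--     prev = -1
--     for j in range(n + 1):
--         if content.startswith(tag, j):
--             prev = j
--         last.append(prev)
--     # stage 1: compute the chunk boundaries
--     bounds = [0]
--     while bounds[-1] < n:
--         start = bounds[-1]
--         end = start + max_length
--         if end < n:
--             s = last[end - t] if end >= t else -1
--             if s >= start:
--                 end = s
--         bounds.append(end)
--     # stage 2: slice between consecutive boundaries
--     return [content[a:b] for a, b in zip(bounds, bounds[1:])]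
-- ===== Notes on version B (the rewrite author's own statement) =====
-- stated objective: alternative
-- what changed: B replaces each per-window content.rfind backward scan by one forward pass that builds a last-occurrence-so-far array (last[j] = latest tag start <= j), computes the chunk boundary list with O(1) lookups into it, and finally slices between consecutive boundaries with zip, instead of A's single loop that scans and appends string chunks directly.
-- outside the precondition, e.g. on split_html_content('<b<b', 2, 'b<'): A returns ['<b', '<b'], B returns ['<b', '<b']
import Mathlib
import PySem

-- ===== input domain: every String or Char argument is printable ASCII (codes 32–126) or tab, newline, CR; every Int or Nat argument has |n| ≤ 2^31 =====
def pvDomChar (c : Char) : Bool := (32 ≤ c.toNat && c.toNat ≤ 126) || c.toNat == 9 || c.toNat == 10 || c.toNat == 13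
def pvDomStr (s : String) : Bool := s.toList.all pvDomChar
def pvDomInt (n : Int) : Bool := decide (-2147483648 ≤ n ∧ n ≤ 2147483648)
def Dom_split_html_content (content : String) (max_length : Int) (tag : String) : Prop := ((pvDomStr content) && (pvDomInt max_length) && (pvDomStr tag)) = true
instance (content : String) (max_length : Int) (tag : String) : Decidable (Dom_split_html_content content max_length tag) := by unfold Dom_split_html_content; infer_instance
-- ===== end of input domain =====

-- B stages the work differently: one forward pass builds a carried "last tag occurrence up to j" array, a boundary list replaces the string-consing loop, and the chunks are sliced between consecutive boundaries (alternative decomposition, same cost class).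
-- Pre_ excludes inputs on which A's while loop can get stuck (end_index == start_index) and hence never returns.


-- ===== PORT A =====
-- A's while loop: under Pre_ every iteration strictly increases start_index while start_index < n,
-- so fuel n+1 is enough; rfind(tag, start, end) is PySem.Chars.rfindFrom, content[start:end] is PySem.List.slice.
def splitLoopA (cs tagL : List Char) (maxLen : Int) (n : Nat) : Nat → Nat → List String
  | 0, _ => []
  | fuel+1, start =>
    if start < n then
      let e0 : Int := (start : Int) + maxLen
      let e : Int :=
        if e0 < (n : Int) then
          let r := PySem.Chars.rfindFrom cs tagL (start : Int) (some e0)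
          if r = -1 then e0 else r
        else e0
      String.ofList (PySem.List.slice cs (some (start : Int)) (some e)) ::
        splitLoopA cs tagL maxLen n fuel e.toNat
    else []

def split_html_content (content : String) (max_length : Int) (tag : String) : List String :=
  let cs := content.toList
  let n := cs.length
  if (n : Int) ≤ max_length then [content]
  else splitLoopA cs tag.toList max_length n (n+1) 0

-- ===== PORT B =====
-- B's first pass: `last.append(prev)` with the carried prev — a foldl over range(n+1) whose state is
-- (the list built so far, prev).  content.startswith(tag, j) for 0 ≤ j is PySem.Chars.startswith on the drop.
def pvLast (cs tagL : List Char) : List Int :=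
  ((List.range (cs.length + 1)).foldl
    (fun (st : List Int × Int) j =>
      let prev := if PySem.Chars.startswith (cs.drop j) tagL then (j : Int) else st.2
      (st.1 ++ [prev], prev)) ([], -1)).1

-- B's boundary loop (`bounds[-1]` is the carried start); as in A, fuel n+1 suffices under Pre_.
-- `last[end - t]` is an in-range plain index (0 ≤ end - t ≤ n when end ≥ t and end < n), ported as getD.
def pvBounds (n t : Nat) (last : List Int) (maxLen : Int) : Nat → Int → List Int
  | 0, _ => []
  | fuel+1, start =>
    if start < (n : Int) then
      let e0 : Int := start + maxLen
      let e : Int :=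
        if e0 < (n : Int) then
          let s : Int := if (t : Int) ≤ e0 then last.getD (e0 - (t : Int)).toNat (-1) else -1
          if start ≤ s then s else e0
        else e0
      e :: pvBounds n t last maxLen fuel e
    else []

def split_html_content_alt (content : String) (max_length : Int) (tag : String) : List String :=
  let cs := content.toList
  let n := cs.length
  if (n : Int) ≤ max_length then [content]
  else
    let bounds : List Int :=
      (0 : Int) :: pvBounds n tag.toList.length (pvLast cs tag.toList) max_length (n+1) 0
    List.zipWith (fun a b => String.ofList (PySem.List.slice cs (some a) (some b)))
      bounds bounds.tail

-- ===== PRECONDITION & SPEC =====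
-- Pre_ excludes exactly the inputs having a "stuck position" i: a tag occurrence at i whose window
-- [i, i+max_length) ends before the content does and contains no later tag occurrence — there A's loop,
-- on reaching i, would set end_index = i and never return (B loops there too).  This is conservative:
-- on inputs whose stuck position is never reached A still returns (see the cite in claim.json), and B
-- returns the same list there.
def Pre_split_html_content (content : String) (max_length : Int) (tag : String) : Prop :=
  content = "" ∨ (content.length : Int) ≤ max_length ∨
  (1 ≤ max_length ∧
    ∀ i : Nat, i < content.length →
      ¬ (tag ≠ "" ∧ (tag.length : Int) ≤ max_length ∧ (i : Int) + max_length < content.length ∧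
         tag.toList.isPrefixOf (content.toList.drop i) = true ∧
         ∀ j : Nat, j < content.length → i < j → (j : Int) + tag.length ≤ (i : Int) + max_length →
           tag.toList.isPrefixOf (content.toList.drop j) = false))

instance (content : String) (max_length : Int) (tag : String) : Decidable (Pre_split_html_content content max_length tag) := by
  unfold Pre_split_html_content; infer_instance

def pvWitness_split_html_content : String × Int × String := ("abcdefgh", 3, "xy")

def Spec_split_html_content (content : String) (max_length : Int) (tag : String) (out : List String) : Prop := out = split_html_content_alt content max_length tag
instance (content : String) (max_length : Int) (tag : String) (out : List String) : Decidable (Spec_split_html_content content max_length tag out) := by unfold Spec_split_html_content; infer_instance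

-- ===== CLAIM (what is proved, stated in full; the proofs are below) =====
def Claim_equal_split_html_content : Prop := ∀ (content : String) (max_length : Int) (tag : String), Dom_split_html_content content max_length tag → Pre_split_html_content content max_length tag → Spec_split_html_content content max_length tag (split_html_content content max_length tag)

-- ===== LEMMAS AND PROOFS =====

def maxHit (P : Nat → Bool) : Nat → Option Nat
  | 0 => if P 0 then some 0 else none
  | j+1 => if P (j+1) then some (j+1) else maxHit P j

-- Lfun j = the value python's last[j] holds: largest occurrence index ≤ j, else -1
def Lfun (P : Nat → Bool) (j : Nat) : Int :=
  match maxHit P j with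
  | none => -1
  | some i => (i : Int)

theorem Lfun_none {P : Nat → Bool} {j : Nat} (h : maxHit P j = none) : Lfun P j = -1 := by
  unfold Lfun; rw [h]

theorem Lfun_some {P : Nat → Bool} {j i : Nat} (h : maxHit P j = some i) : Lfun P j = (i : Int) := by
  unfold Lfun; rw [h]

theorem maxHit_none {P : Nat → Bool} {j : Nat} (h : maxHit P j = none) : ∀ i, i ≤ j → P i = false := by
  induction j with
  | zero =>
    intro i hi
    interval_cases i
    by_cases hP : P 0 = true
    · simp [maxHit, hP] at h
    · simpa using hP
  | succ j ih =>
    intro i hi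
    by_cases hP : P (j+1) = true
    · simp [maxHit, hP] at h
    · have h' : maxHit P j = none := by simpa [maxHit, hP] using h
      rcases Nat.le_succ_iff.mp hi with h2 | h2
      · exact ih h' i h2
      · subst h2; simpa using hP

theorem maxHit_some {P : Nat → Bool} {j : Nat} : ∀ {i}, maxHit P j = some i →
    P i = true ∧ i ≤ j ∧ ∀ i', i' ≤ j → P i' = true → i' ≤ i := by
  induction j with
  | zero =>
    intro i h
    by_cases hP : P 0 = true
    · simp [maxHit, hP] at h
      exact ⟨h ▸ hP, by omega, fun i' hi' _ => by omega⟩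
    · simp [maxHit, hP] at h
  | succ j ih =>
    intro i h
    by_cases hP : P (j+1) = true
    · simp [maxHit, hP] at h
      subst h
      exact ⟨hP, le_refl _, fun i' hi' _ => hi'⟩
    · have h' : maxHit P j = some i := by simpa [maxHit, hP] using h
      obtain ⟨h1, h2, h3⟩ := ih h'
      refine ⟨h1, by omega, fun i' hi' hPi' => ?_⟩
      rcases Nat.le_succ_iff.mp hi' with h4 | h4
      · exact h3 i' h4 hPi'
      · exact absurd hPi' (by simpa [h4] using hP)

theorem rfind_go_eq (s sub : List Char) (j : Nat) :
    PySem.Chars.rfind.go s sub j =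
      (match maxHit (fun i => sub.isPrefixOf (s.drop i)) j with
       | none => (-1 : Int)
       | some i => (i : Int)) := by
  induction j with
  | zero => simp only [PySem.Chars.rfind.go, maxHit, List.drop_zero]; split_ifs with h <;> rfl
  | succ j ih =>
    simp only [PySem.Chars.rfind.go, maxHit]
    split_ifs with h
    · rfl
    · exact ih

theorem rfindFrom_window (cs tagL : List Char) (start m : Nat) (hsm : start + m < cs.length) :
    PySem.Chars.rfindFrom cs tagL (start : Int) (some ((start:Int)+(m:Int))) =
      (match maxHit (fun i => tagL.isPrefixOf ((cs.drop (start+i)).take (m-i))) m with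
       | none => (-1 : Int)
       | some i => ((start+i : Nat) : Int)) := by
  have h1 : ¬ ((cs.length : Int) < (start:Int)+(m:Int)) := by omega
  have h2 : ¬ ((start:Int)+(m:Int) < 0) := by omega
  have h3 : ¬ ((start:Int) < 0) := by omega
  have h4 : ¬ ((start:Int)+(m:Int) < (start:Int)) := by omega
  simp only [PySem.Chars.rfindFrom, h1, h2, h3, h4, if_false]
  have hdt : List.drop (start:Int).toNat (List.take ((start:Int)+(m:Int)).toNat cs)
      = (cs.drop start).take m := by
    rw [List.drop_take]
    have : ((start:Int)+(m:Int)).toNat - (start:Int).toNat = m := by omega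
    rw [this]
    have : ((start:Int)).toNat = start := by omega
    rw [this]
  rw [hdt]
  have hlen : ((cs.drop start).take m).length = m := by
    simp only [List.length_take, List.length_drop]
    omega
  unfold PySem.Chars.rfind
  rw [hlen, rfind_go_eq]
  have hP : (fun i => tagL.isPrefixOf (((cs.drop start).take m).drop i))
      = (fun i => tagL.isPrefixOf ((cs.drop (start+i)).take (m-i))) := by
    funext i
    rw [List.drop_take, List.drop_drop]
  rw [hP]
  cases hmh : maxHit (fun i => tagL.isPrefixOf ((cs.drop (start+i)).take (m-i))) m with
  | none => simp
  | some i =>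
    have : ¬ ((i:Int) = -1) := by omega
    simp [this]

-- the foldl invariant: after range m, the built list is map (Lfun P) (range m) and prev = last built value
theorem pvLast_foldl (cs tagL : List Char) (m : Nat) :
    ((List.range m).foldl
      (fun (st : List Int × Int) j =>
        let prev := if PySem.Chars.startswith (cs.drop j) tagL then (j : Int) else st.2
        (st.1 ++ [prev], prev)) ([], -1))
      = ((List.range m).map (Lfun (fun i => tagL.isPrefixOf (cs.drop i))),
         if m = 0 then -1 else Lfun (fun i => tagL.isPrefixOf (cs.drop i)) (m-1)) := by
  induction m with
  | zero => simp
  | succ m ih =>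
    rw [List.range_succ, List.foldl_append, ih, List.map_append]
    cases m with
    | zero =>
      simp only [List.foldl_cons, List.foldl_nil]
      unfold Lfun maxHit PySem.Chars.startswith
      simp only [List.drop_zero]
      split_ifs <;> simp_all
    | succ k =>
      simp only [List.foldl_cons, List.foldl_nil]
      have hL : Lfun (fun i => tagL.isPrefixOf (cs.drop i)) (k+1)
          = if PySem.Chars.startswith (cs.drop (k+1)) tagL then ((k+1 : Nat) : Int)
            else Lfun (fun i => tagL.isPrefixOf (cs.drop i)) k := by
        unfold Lfun PySem.Chars.startswith
        show (match maxHit _ (k+1) with | none => (-1:Int) | some i => (i:Int)) = _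
        rw [show maxHit (fun i => tagL.isPrefixOf (cs.drop i)) (k+1)
            = if tagL.isPrefixOf (cs.drop (k+1)) then some (k+1)
              else maxHit (fun i => tagL.isPrefixOf (cs.drop i)) k from rfl]
        split_ifs with h
        · rfl
        · rfl
      simp [hL]

theorem pvLast_getD (cs tagL : List Char) (k : Nat) (hk : k < cs.length + 1) :
    (pvLast cs tagL).getD k (-1) = Lfun (fun i => tagL.isPrefixOf (cs.drop i)) k := by
  unfold pvLast
  rw [pvLast_foldl]
  rw [List.getD_eq_getElem?_getD, List.getElem?_map]
  rw [List.getElem?_range hk]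
  rfl

-- per-window end: A's rfind expression equals B's last-array expression
theorem end_eq (cs tagL : List Char) (maxLen : Int) (hm : 1 ≤ maxLen) (start : Nat)
    (hlt : ((start : Int) + maxLen) < (cs.length : Int)) :
    (let e0 : Int := (start : Int) + maxLen
     let r := PySem.Chars.rfindFrom cs tagL (start : Int) (some e0)
     if r = -1 then e0 else r)
    =
    (let e0 : Int := (start : Int) + maxLen
     let s : Int := if ((tagL.length : Nat) : Int) ≤ e0
        then (pvLast cs tagL).getD (e0 - ((tagL.length : Nat) : Int)).toNat (-1) else -1
     if (start : Int) ≤ s then s else e0) := by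
  obtain ⟨m, rfl⟩ : ∃ m : Nat, maxLen = (m:Int) := ⟨maxLen.toNat, (Int.toNat_of_nonneg (by omega)).symm⟩
  have hsm : start + m < cs.length := by exact_mod_cast hlt
  set t := tagL.length with ht
  simp only
  rw [rfindFrom_window cs tagL start m hsm]
  set P := fun i => tagL.isPrefixOf (cs.drop i) with hP
  by_cases htle : ((t : Nat) : Int) ≤ (start : Int) + (m : Int)
  · -- tag fits in the window prefix bound; j = start + m - t
    have hj : ((start : Int) + (m : Int) - ((t : Nat) : Int)).toNat = start + m - t := by omega
    have htm : t ≤ start + m := by exact_mod_cast htle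
    rw [if_pos htle, hj, pvLast_getD cs tagL _ (by omega)]
    cases hmh : maxHit (fun i => tagL.isPrefixOf ((cs.drop (start+i)).take (m-i))) m with
    | none =>
      have hnone := maxHit_none hmh
      simp only [reduceIte]
      rw [if_neg]
      intro hks
      cases hL : maxHit P (start + m - t) with
      | none => rw [Lfun_none hL] at hks; omega
      | some i0 =>
        rw [Lfun_some hL] at hks
        obtain ⟨hPi0, hi0le, _⟩ := maxHit_some hL
        have hsi0 : start ≤ i0 := by exact_mod_cast hks
        have hQ : tagL.isPrefixOf ((cs.drop (start + (i0 - start))).take (m - (i0 - start))) = true := by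
          have he : start + (i0 - start) = i0 := by omega
          rw [he, List.isPrefixOf_iff_prefix, List.prefix_take_iff]
          exact ⟨List.isPrefixOf_iff_prefix.mp hPi0, by omega⟩
        have := hnone (i0 - start) (by omega)
        rw [hQ] at this
        exact Bool.noConfusion this
    | some i =>
      obtain ⟨hPi, him, hmax⟩ := maxHit_some hmh
      rw [List.isPrefixOf_iff_prefix, List.prefix_take_iff] at hPi
      obtain ⟨hpre, hlen⟩ := hPi
      have hfit : start + i ≤ start + m - t := by omega
      have hPa : P (start + i) = true := by
        simpa [hP] using List.isPrefixOf_iff_prefix.mpr hpre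
      cases hL : maxHit P (start + m - t) with
      | none =>
        exact absurd hPa (by simpa using maxHit_none hL (start+i) hfit)
      | some i0 =>
        obtain ⟨hPi0, hi0le, hmax0⟩ := maxHit_some hL
        have h1 : start + i ≤ i0 := hmax0 (start+i) hfit hPa
        have hQ : tagL.isPrefixOf ((cs.drop (start + (i0 - start))).take (m - (i0 - start))) = true := by
          have he : start + (i0 - start) = i0 := by omega
          rw [he, List.isPrefixOf_iff_prefix, List.prefix_take_iff]
          exact ⟨List.isPrefixOf_iff_prefix.mp hPi0, by omega⟩
        have h2 : i0 - start ≤ i := hmax (i0 - start) (by omega) hQ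
        have hi0 : i0 = start + i := by omega
        have hne : ¬ (((start + i : Nat) : Int) = -1) := by push_cast; omega
        rw [if_neg hne, Lfun_some hL, hi0,
          if_pos (by exact_mod_cast (by omega : (start:Int) ≤ ((start+i:Nat):Int)))]
  · -- tag longer than the window end: no match can fit
    rw [if_neg htle]
    have htm : start + m < t := by omega
    cases hmh : maxHit (fun i => tagL.isPrefixOf ((cs.drop (start+i)).take (m-i))) m with
    | none =>
      have hns : ¬ ((start : Int) ≤ (-1 : Int)) := by omega
      simp only [reduceIte]
      rw [if_neg hns]
    | some i =>
      obtain ⟨hPi, him, _⟩ := maxHit_some hmh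
      rw [List.isPrefixOf_iff_prefix, List.prefix_take_iff] at hPi
      omega

theorem loop_eq (cs tagL : List Char) (maxLen : Int) (hm : 1 ≤ maxLen) :
    ∀ fuel (start : Nat), splitLoopA cs tagL maxLen cs.length fuel start
      = List.zipWith (fun a b => String.ofList (PySem.List.slice cs (some a) (some b)))
          ((start : Int) :: pvBounds cs.length tagL.length (pvLast cs tagL) maxLen fuel (start : Int))
          (pvBounds cs.length tagL.length (pvLast cs tagL) maxLen fuel (start : Int)) := by
  intro fuel
  induction fuel with
  | zero => intro start; rfl
  | succ fuel ih =>
    intro start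
    simp only [splitLoopA, pvBounds]
    by_cases hs : start < cs.length
    · have hs' : (start : Int) < (cs.length : Int) := by exact_mod_cast hs
      rw [if_pos hs, if_pos hs']
      by_cases he : ((start : Int) + maxLen) < (cs.length : Int)
      · simp only [if_pos he]
        rw [end_eq cs tagL maxLen hm start he]
        set e : Int :=
          (let s : Int := if ((tagL.length : Nat) : Int) ≤ (start : Int) + maxLen
              then (pvLast cs tagL).getD (((start : Int) + maxLen) - ((tagL.length : Nat) : Int)).toNat (-1) else -1
           if (start : Int) ≤ s then s else (start : Int) + maxLen) with hedef
        have he0 : 0 ≤ e := by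
          rw [hedef]
          dsimp only
          split_ifs <;> omega
        have hcast : ((e.toNat : Nat) : Int) = e := Int.toNat_of_nonneg he0
        rw [List.zipWith_cons_cons, ih e.toNat, hcast]
      · simp only [if_neg he]
        have he0 : 0 ≤ (start : Int) + maxLen := by omega
        have hcast : ((((start : Int) + maxLen).toNat : Nat) : Int) = (start : Int) + maxLen :=
          Int.toNat_of_nonneg he0
        rw [List.zipWith_cons_cons, ih ((start : Int) + maxLen).toNat, hcast]
    · have hs' : ¬ ((start : Int) < (cs.length : Int)) := by exact_mod_cast hs
      rw [if_neg hs, if_neg hs']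
      rfl

-- ===== VERDICT (by name: the statement is the Claim_ definition above) =====
theorem split_html_content_spec : Claim_equal_split_html_content := by
  intro content max_length tag _ hpre
  unfold Spec_split_html_content split_html_content split_html_content_alt
  by_cases hle : ((content.toList.length : Int) ≤ max_length)
  · rw [if_pos hle, if_pos hle]
  · rw [if_neg hle, if_neg hle]
    rcases hpre with h0 | h1 | ⟨hm, _⟩
    · subst h0
      show splitLoopA "".toList _ _ _ _ _ = _
      simp [splitLoopA, pvBounds, String.toList]
    · exact absurd (by simpa using h1) (by simpa using hle)
    · have := loop_eq content.toList tag.toList max_length hm (content.toList.length + 1) 0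
      simpa using this
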